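-- pv_equiv track=rewrite | github.com/snaptravel/git-lint | gitlint/fixers.py | get_modified_lines_range_tuples
-- ===== SOURCE A (Python) =====
-- DEFAULT_FIX_LINE_EXPANSION = 0
--
-- def get_modified_lines_range_tuples(modified_lines, fix_line_exp):
--     """Returns a list of (modified line range start, modified line range end) tuples."""
--     if fix_line_exp is None:
--         fix_line_exp = DEFAULT_FIX_LINE_EXPANSION
--     else:
--         try:
--             fix_line_exp = int(fix_line_exp)
--         except ValueError:
--             raise ValueError('Fix line expansion must be a non-negative integer')
--         if fix_line_exp < 0:
--             raise ValueError('Fix line expansion must be a non-negative integer')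
--     sorted_lines = sorted(modified_lines)
--     modified_lines_ranges = []
--     range_start = -1
--     range_end = -1
--     sorted_lines_len = len(sorted_lines)
--     for ix, line in enumerate(sorted_lines):
--         if range_start == -1:
--             range_start = max(1, line - fix_line_exp)
--         elif line - fix_line_exp > range_end + 1:
--             modified_lines_ranges.append((range_start, range_end))
--             range_start = max(1, line - fix_line_exp)
--         range_end = line + fix_line_exp
--         if ix == (sorted_lines_len - 1):
--             modified_lines_ranges.append((range_start, range_end))
--     return modified_lines_ranges
-- ===== SOURCE B (Python) =====
-- DEFAULT_FIX_LINE_EXPANSION = 0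
--
-- def get_modified_lines_range_tuples(modified_lines, fix_line_exp):
--     """Divide and conquer: recursively compute the (unclamped) ranges of each half of
--     the sorted array, merge the two halves' boundary ranges if they touch, and clamp
--     every start to 1 in one final pass."""
--     if fix_line_exp is None:
--         fix_line_exp = DEFAULT_FIX_LINE_EXPANSION
--     else:
--         try:
--             fix_line_exp = int(fix_line_exp)
--         except ValueError:
--             raise ValueError('Fix line expansion must be a non-negative integer')
--         if fix_line_exp < 0:
--             raise ValueError('Fix line expansion must be a non-negative integer')
--
--     def merge(left, right):
--         (ls, le), (rs, re) = left[-1], right[0]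
--         if rs <= le + 1:
--             return left[:-1] + [(ls, re)] + right[1:]
--         return left + right
--
--     def ranges(s, lo, hi):
--         # unclamped ranges of the sorted slice s[lo:hi] (hi > lo)
--         if hi - lo <= 1:
--             x = s[lo]
--             return [(x - fix_line_exp, x + fix_line_exp)]
--         mid = (lo + hi) // 2
--         return merge(ranges(s, lo, mid), ranges(s, mid, hi))
--
--     s = sorted(modified_lines)
--     if not s:
--         return []
--     return [(max(1, a), b) for a, b in ranges(s, 0, len(s))]
-- ===== Notes on version B (the rewrite author's own statement) =====
-- stated objective: alternative
-- what changed: A does one stateful left-to-right merge over the sorted lines (sentinel -1 state, flush at the last index); B recursively splits the sorted array in half (divide and conquer), computes each half's unclamped ranges, merges the two boundary ranges when they touch, and clamps starts to 1 in a final pass.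
import Mathlib
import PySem

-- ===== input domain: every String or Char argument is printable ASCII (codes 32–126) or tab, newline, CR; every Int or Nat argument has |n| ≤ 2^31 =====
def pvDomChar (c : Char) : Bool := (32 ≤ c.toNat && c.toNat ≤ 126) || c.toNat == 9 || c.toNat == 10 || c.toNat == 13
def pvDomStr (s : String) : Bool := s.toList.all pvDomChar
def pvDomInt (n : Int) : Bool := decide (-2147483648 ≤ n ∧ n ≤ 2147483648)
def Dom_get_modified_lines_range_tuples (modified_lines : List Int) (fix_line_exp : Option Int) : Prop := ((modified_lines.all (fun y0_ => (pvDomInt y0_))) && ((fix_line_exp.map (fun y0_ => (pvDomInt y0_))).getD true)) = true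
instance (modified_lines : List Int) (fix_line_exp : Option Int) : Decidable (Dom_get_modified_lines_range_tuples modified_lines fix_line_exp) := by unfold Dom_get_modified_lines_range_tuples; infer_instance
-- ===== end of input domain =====

-- B replaces A's single stateful left-to-right merge by a divide-and-conquer recursion
-- over the sorted array (merge the halves' boundary ranges, clamp starts at the end);
-- objective: alternative.

-- ===== PORT A =====
-- loop body of A's for-loop over enumerate(sorted_lines); state = (modified_lines_ranges, range_start, range_end)
def pvStepA (e n : Int) (st : List (Int × Int) × Int × Int) (p : Int × Int) :
    List (Int × Int) × Int × Int :=
  let acc := st.1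
  let rs := st.2.1
  let re := st.2.2
  let ix := p.1
  let line := p.2
  let (acc, rs) :=
    if rs == -1 then (acc, max 1 (line - e))
    else if line - e > re + 1 then (acc ++ [(rs, re)], max 1 (line - e))
    else (acc, rs)
  let re := line + e
  let acc := if ix == n - 1 then acc ++ [(rs, re)] else acc
  (acc, rs, re)

def get_modified_lines_range_tuples (modified_lines : List Int) (fix_line_exp : Option Int) : List (Int × Int) :=
  -- int(fix_line_exp) is the identity on an int; fix_line_exp < 0 raises ValueError (excluded by Pre_)
  let e : Int := match fix_line_exp with
    | none => 0
    | some v => v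
  let sorted_lines := PySem.List.sorted modified_lines (fun x => x) false
  let n : Int := sorted_lines.length
  ((PySem.List.enumerate sorted_lines).foldl (pvStepA e n) ([], -1, -1)).1

-- ===== PORT B =====
-- B's `merge(left, right)` helper: left[-1] / right[0] read with getD (both lists are
-- nonempty whenever merge is called, so the defaults are never used)
def pvCombine (left right : List (Int × Int)) : List (Int × Int) :=
  if (right.headD (0, 0)).1 ≤ (left.getLast?.getD (0, 0)).2 + 1 then
    left.dropLast ++ [((left.getLast?.getD (0, 0)).1, (right.headD (0, 0)).2)] ++ right.tail
  else left ++ right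

-- B's `ranges(s, lo, hi)` helper: unclamped ranges of the slice s[lo:hi];
-- s[lo] is read with getD (every call keeps lo < hi ≤ len(s), so the index is in range)
def pvRanges (e : Int) (s : List Int) (lo hi : Nat) : List (Int × Int) :=
  if hi - lo ≤ 1 then [(s.getD lo 0 - e, s.getD lo 0 + e)]
  else pvCombine (pvRanges e s lo ((lo + hi) / 2)) (pvRanges e s ((lo + hi) / 2) hi)
termination_by hi - lo
decreasing_by
  · omega
  · omega

def get_modified_lines_range_tuples_alt (modified_lines : List Int) (fix_line_exp : Option Int) : List (Int × Int) :=
  let e : Int := match fix_line_exp with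
    | none => 0
    | some v => v
  let s := PySem.List.sorted modified_lines (fun x => x) false
  if s.isEmpty then []
  else (pvRanges e s 0 s.length).map (fun p => (max 1 p.1, p.2))

-- ===== PRECONDITION & SPEC =====
-- A raises ValueError when fix_line_exp is a negative integer (B raises there too); excluded.
def Pre_get_modified_lines_range_tuples (_modified_lines : List Int) (fix_line_exp : Option Int) : Prop :=
  0 ≤ fix_line_exp.getD 0
instance (modified_lines : List Int) (fix_line_exp : Option Int) : Decidable (Pre_get_modified_lines_range_tuples modified_lines fix_line_exp) := by unfold Pre_get_modified_lines_range_tuples; infer_instance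

def pvWitness_get_modified_lines_range_tuples : List Int × Option Int := ([3, 1, 10, 4], some 1)

def Spec_get_modified_lines_range_tuples (modified_lines : List Int) (fix_line_exp : Option Int) (out : List (Int × Int)) : Prop := out = get_modified_lines_range_tuples_alt modified_lines fix_line_exp
instance (modified_lines : List Int) (fix_line_exp : Option Int) (out : List (Int × Int)) : Decidable (Spec_get_modified_lines_range_tuples modified_lines fix_line_exp out) := by unfold Spec_get_modified_lines_range_tuples; infer_instance

-- ===== CLAIM (what is proved, stated in full; the proofs are below) =====
def Claim_equal_get_modified_lines_range_tuples : Prop := ∀ (modified_lines : List Int) (fix_line_exp : Option Int), Dom_get_modified_lines_range_tuples modified_lines fix_line_exp → Pre_get_modified_lines_range_tuples modified_lines fix_line_exp → Spec_get_modified_lines_range_tuples modified_lines fix_line_exp (get_modified_lines_range_tuples modified_lines fix_line_exp)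

-- ===== LEMMAS AND PROOFS =====

-- A's merge as a recursion: open interval (s, en) with CLAMPED start, remaining lines xs
def pvMerge (e s en : Int) : List Int → List (Int × Int)
  | [] => [(s, en)]
  | x :: rest =>
      if en + 1 < x - e then (s, en) :: pvMerge e (max 1 (x - e)) (x + e) rest
      else pvMerge e s (x + e) rest

-- the same merge with UNCLAMPED starts (what B's recursion computes)
def pvMergeRaw (e s en : Int) : List Int → List (Int × Int)
  | [] => [(s, en)]
  | x :: rest =>
      if en + 1 < x - e then (s, en) :: pvMergeRaw e (x - e) (x + e) rest
      else pvMergeRaw e s (x + e) rest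

def pvRawRanges (e : Int) : List Int → List (Int × Int)
  | [] => []
  | x :: rest => pvMergeRaw e (x - e) (x + e) rest

lemma pvA_loop (e n : Int) (xs : List Int) : ∀ (k : Int) (acc : List (Int × Int)) (rs re : Int),
    1 ≤ rs → k + (xs.length : Int) = n →
    ((PySem.List.enumerate xs k).foldl (pvStepA e n) (acc, rs, re)).1
      = acc ++ (if xs.isEmpty then [] else pvMerge e rs re xs) := by
  induction xs with
  | nil => intro k acc rs re h1 h2; simp [PySem.List.enumerate]
  | cons x rest ih =>
    intro k acc rs re h1 h2
    rw [PySem.List.enumerate_cons, List.foldl_cons]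
    have hrs : (rs == -1) = false := by simp; omega
    rcases List.eq_nil_or_concat' rest with hrest | ⟨_, _, hne⟩
    · subst hrest
      have hk : (k == n - 1) = true := by simp at h2 ⊢; omega
      by_cases hc : re + 1 < x - e
      · simp [pvStepA, hrs, hk, pvMerge, hc, PySem.List.enumerate]
      · have : ¬ (x - e > re + 1) := by omega
        simp [pvStepA, hrs, hk, pvMerge, hc, PySem.List.enumerate]
    · have hrne : rest ≠ [] := by subst hne; simp
      have hlen : (0:Int) < (rest.length : Int) := by
        exact_mod_cast List.length_pos_iff.mpr hrne
      have hk : (k == n - 1) = false := by simp at h2 ⊢; omega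
      have h2' : (k + 1) + (rest.length : Int) = n := by simp at h2 ⊢; omega
      by_cases hc : re + 1 < x - e
      · have hg : x - e > re + 1 := hc
        simp only [pvStepA, hrs, Bool.false_eq_true, if_false, if_pos hg, hk]
        rw [ih (k+1) _ _ _ (le_max_left _ _) h2']
        simp [pvMerge, hc, hrne]
      · have hg : ¬ (x - e > re + 1) := by omega
        simp only [pvStepA, hrs, Bool.false_eq_true, if_false, if_neg hg, hk]
        rw [ih (k+1) _ _ _ h1 h2']
        simp [pvMerge, hc, hrne]

-- the start argument only affects the first tuple's first component
lemma pvMergeRaw_start (e : Int) : ∀ (t : List Int) (s s' en : Int),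
    pvMergeRaw e s en t
      = (s, ((pvMergeRaw e s' en t).headD (0,0)).2) :: (pvMergeRaw e s' en t).tail := by
  intro t
  induction t with
  | nil => intro s s' en; simp [pvMergeRaw]
  | cons x rest ih =>
    intro s s' en
    by_cases hc : en + 1 < x - e
    · simp [pvMergeRaw, hc]
    · simp only [pvMergeRaw, if_neg hc]
      exact ih s s' (x + e)

-- append lemma: continuing the merge past xs into h :: t
lemma pvMergeRaw_append (e h : Int) (t : List Int) : ∀ (xs : List Int) (s en : Int),
    pvMergeRaw e s en (xs ++ h :: t) =
      if (((pvMergeRaw e s en xs).getLast?.getD (0,0)).2) + 1 < h - e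
      then pvMergeRaw e s en xs ++ pvMergeRaw e (h - e) (h + e) t
      else (pvMergeRaw e s en xs).dropLast
           ++ pvMergeRaw e (((pvMergeRaw e s en xs).getLast?.getD (0,0)).1) (h + e) t := by
  intro xs
  induction xs with
  | nil =>
    intro s en
    by_cases hc : en + 1 < h - e
    · simp [pvMergeRaw, hc]
    · simp [pvMergeRaw, hc]
  | cons x xs' ih =>
    intro s en
    by_cases hc : en + 1 < x - e
    · simp only [List.cons_append, pvMergeRaw, if_pos hc]
      rw [ih (x - e) (x + e)]
      obtain ⟨p, r, hL⟩ : ∃ p r, pvMergeRaw e (x - e) (x + e) xs' = p :: r :=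
        ⟨_, _, pvMergeRaw_start e xs' (x - e) (x - e) (x + e)⟩
      rw [hL]
      rw [show ((s, en) :: p :: r).getLast? = (p :: r).getLast? from List.getLast?_cons_cons,
          List.dropLast_cons₂]
      split_ifs <;> simp
    · simp only [List.cons_append, pvMergeRaw, if_neg hc]
      exact ih s (x + e)

-- B's combine on the raw-ranges level
lemma pvRawRanges_append (e : Int) (xs ys : List Int) (hx : xs ≠ []) (hy : ys ≠ []) :
    pvRawRanges e (xs ++ ys) = pvCombine (pvRawRanges e xs) (pvRawRanges e ys) := by
  cases xs with
  | nil => exact absurd rfl hx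
  | cons x xs' =>
    cases ys with
    | nil => exact absurd rfl hy
    | cons h t =>
      simp only [pvRawRanges, List.cons_append]
      have hRshape := pvMergeRaw_start e t (h - e) (h - e) (h + e)
      have hhead : ((pvMergeRaw e (h - e) (h + e) t).headD (0,0)).1 = h - e := by
        conv_lhs => rw [hRshape]
        rfl
      rw [pvMergeRaw_append e h t xs' (x - e) (x + e)]
      unfold pvCombine
      by_cases hc : ((pvMergeRaw e (x - e) (x + e) xs').getLast?.getD (0,0)).2 + 1 < h - e
      · rw [if_pos hc, if_neg (by rw [hhead]; omega)]
      · rw [if_neg hc, if_pos (by rw [hhead]; omega)]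
        rw [pvMergeRaw_start e t ((pvMergeRaw e (x - e) (x + e) xs').getLast?.getD (0,0)).1
              (h - e) (h + e)]
        simp

-- B's recursion computes the raw ranges of the slice s[lo:hi]
lemma pvRanges_eq (e : Int) (s : List Int) : ∀ (n lo hi : Nat), hi - lo ≤ n → lo < hi → hi ≤ s.length →
    pvRanges e s lo hi = pvRawRanges e ((s.drop lo).take (hi - lo)) := by
  intro n
  induction n with
  | zero => intro lo hi h1 h2 h3; omega
  | succ n ih =>
    intro lo hi hn hlt hle
    by_cases hbase : hi - lo ≤ 1
    · have hlo : lo < s.length := by omega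
      have hdrop : s.drop lo = s[lo] :: s.drop (lo + 1) := List.drop_eq_getElem_cons hlo
      have h1 : hi - lo = 1 := by omega
      rw [pvRanges, if_pos hbase, h1, hdrop]
      have hgd : s.getD lo 0 = s[lo] := by
        simp [List.getD, List.getElem?_eq_getElem hlo]
      rw [hgd]
      rfl
    · rw [pvRanges, if_neg hbase]
      have hmlo : lo < (lo + hi) / 2 := by omega
      have hmhi : (lo + hi) / 2 < hi := by omega
      rw [ih lo ((lo + hi) / 2) (by omega) hmlo (by omega),
          ih ((lo + hi) / 2) hi (by omega) hmhi hle]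
      have hsplit : (s.drop lo).take (hi - lo)
          = (s.drop lo).take ((lo + hi) / 2 - lo) ++ (s.drop ((lo + hi) / 2)).take (hi - (lo + hi) / 2) := by
        rw [show hi - lo = ((lo + hi) / 2 - lo) + (hi - (lo + hi) / 2) from by omega,
            List.take_add, List.drop_drop]
        rw [show lo + ((lo + hi) / 2 - lo) = (lo + hi) / 2 from by omega]
      rw [hsplit]
      have hx : (s.drop lo).take ((lo + hi) / 2 - lo) ≠ [] := by
        intro hcontra
        rcases List.take_eq_nil_iff.mp hcontra with h | h
        · omega
        · rw [List.drop_eq_nil_iff] at h; omega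
      have hy : (s.drop ((lo + hi) / 2)).take (hi - (lo + hi) / 2) ≠ [] := by
        intro hcontra
        rcases List.take_eq_nil_iff.mp hcontra with h | h
        · omega
        · rw [List.drop_eq_nil_iff] at h; omega
      rw [pvRawRanges_append e _ _ hx hy]

-- clamping commutes with the merge
lemma pvMerge_clamp (e : Int) : ∀ (xs : List Int) (s en : Int),
    pvMerge e (max 1 s) en xs = (pvMergeRaw e s en xs).map (fun p => (max 1 p.1, p.2)) := by
  intro xs
  induction xs with
  | nil => intro s en; simp [pvMerge, pvMergeRaw]
  | cons x rest ih =>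
    intro s en
    by_cases hc : en + 1 < x - e
    · simp only [pvMerge, pvMergeRaw, if_pos hc, List.map_cons]
      rw [ih (x - e) (x + e)]
    · simp only [pvMerge, pvMergeRaw, if_neg hc]
      exact ih s (x + e)

lemma pv_main (e : Int) (ml : List Int) :
    get_modified_lines_range_tuples ml (some e) = get_modified_lines_range_tuples_alt ml (some e) := by
  unfold get_modified_lines_range_tuples get_modified_lines_range_tuples_alt
  cases hxs : PySem.List.sorted ml (fun x => x) false with
  | nil => simp [PySem.List.enumerate]
  | cons x rest =>
    simp only [List.isEmpty_cons, Bool.false_eq_true, if_false, List.length_cons]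
    -- B side
    rw [pvRanges_eq e (x :: rest) (rest.length + 1) 0 (rest.length + 1) le_rfl (by omega) (by simp)]
    rw [show List.take (rest.length + 1 - 0) (List.drop 0 (x :: rest)) = x :: rest from by
          simp]
    simp only [pvRawRanges]
    rw [← pvMerge_clamp e rest (x - e) (x + e)]
    -- A side
    rw [PySem.List.enumerate_cons, List.foldl_cons]
    rcases List.eq_nil_or_concat' rest with hrest | ⟨_, _, hne⟩
    · subst hrest
      simp [pvStepA, pvMerge, PySem.List.enumerate]
    · have hrne : rest ≠ [] := by subst hne; simp
      have hk : ((0:Int) == ((rest.length + 1 : Nat) : Int) - 1) = false := by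
        have : (0:Int) < (rest.length : Int) := by exact_mod_cast List.length_pos_iff.mpr hrne
        simp; omega
      simp only [pvStepA, show ((-1 : Int) == -1) = true from rfl, if_true, hk, Bool.false_eq_true, if_false]
      rw [show (0:Int) + 1 = 1 from rfl]
      rw [pvA_loop e _ rest 1 _ _ _ (le_max_left _ _) (by push_cast; omega)]
      simp [hrne]

-- ===== VERDICT (by name: the statement is the Claim_ definition above) =====
theorem get_modified_lines_range_tuples_spec : Claim_equal_get_modified_lines_range_tuples := by
  intro ml fle _ _
  unfold Spec_get_modified_lines_range_tuples
  cases fle with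
  | none => exact pv_main 0 ml
  | some v => exact pv_main v ml
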